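-- pv_equiv track=rewrite | github.com/p-lots/codewars | 7-kyu/hands-up/python/solution.py | convert_to_base_three
-- ===== SOURCE A (Python) =====
-- def convert_to_base_three(n):
--     if n == 0:
--         return [0]
--     ret = []
--     while n != 0:
--         ret.append(n % 3)
--         n //= 3
--     return ret
-- ===== SOURCE B (Python) =====
-- def convert_to_base_three(n):
--     if n == 0:
--         return [0]
--     digits = []
--     p = 1
--     while p <= n:
--         digits.append(n // p % 3)
--         p *= 3
--     return digits
-- ===== Notes on version B (the rewrite author's own statement) =====
-- stated objective: alternative
-- what changed: Instead of destructively halving n (n //= 3) and appending remainders, B keeps n fixed and scans increasing powers of three, emitting (n // p) % 3 for p = 1, 3, 9, ... while p <= n.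
import Mathlib
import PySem

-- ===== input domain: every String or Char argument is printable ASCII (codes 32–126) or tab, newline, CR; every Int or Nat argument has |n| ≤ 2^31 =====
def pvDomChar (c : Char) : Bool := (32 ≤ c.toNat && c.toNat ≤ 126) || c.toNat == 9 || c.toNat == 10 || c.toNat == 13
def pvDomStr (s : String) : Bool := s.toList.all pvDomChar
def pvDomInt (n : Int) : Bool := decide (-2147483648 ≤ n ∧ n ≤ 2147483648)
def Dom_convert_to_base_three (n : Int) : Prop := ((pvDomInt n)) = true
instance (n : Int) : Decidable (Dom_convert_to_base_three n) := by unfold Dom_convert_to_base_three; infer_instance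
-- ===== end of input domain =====

-- B keeps n fixed and scans increasing powers of three, emitting (n // p) % 3 while p <= n, instead of A's destructive halving of n; return values agree on n ≥ 0 (A's while-loop never terminates on negative n).

-- ===== PORT A =====
-- the while loop of A; the n < 0 branch is a totality guard (Python loops forever there; outside Pre_)
def convert_to_base_three_loop (n : Int) (ret : List Int) : List Int :=
  if n = 0 then ret
  else if _h : n < 0 then ret
  else convert_to_base_three_loop (PySem.Int.floordiv n 3) (ret ++ [PySem.Int.mod n 3])
termination_by n.toNat
decreasing_by
  have h3 : PySem.Int.floordiv n 3 = n / 3 := PySem.Int.floordiv_eq_ediv_of_pos (by omega)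
  rw [h3]; omega

def convert_to_base_three (n : Int) : List Int :=
  if n = 0 then [0]
  else convert_to_base_three_loop n []

-- ===== PORT B =====
-- the while loop of B over the power p; the p ≤ 0 branch is a totality guard (B always enters with p = 1, and p only triples)
def convert_to_base_three_pow (n p : Int) : List Int :=
  if _c : ¬ (p ≤ n) then []
  else if _h : p ≤ 0 then []
  else PySem.Int.mod (PySem.Int.floordiv n p) 3 :: convert_to_base_three_pow n (p * 3)
termination_by (n + 1 - p).toNat
decreasing_by omega

def convert_to_base_three_alt (n : Int) : List Int :=
  if n = 0 then [0]
  else convert_to_base_three_pow n 1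

-- ===== PRECONDITION & SPEC =====
-- Pre_ excludes negative n: there A's while-loop never terminates (n // 3 floors toward -∞, so n never reaches 0).
def Pre_convert_to_base_three (n : Int) : Prop := 0 ≤ n
instance (n : Int) : Decidable (Pre_convert_to_base_three n) := by unfold Pre_convert_to_base_three; infer_instance
def pvWitness_convert_to_base_three : Int := (17)

def Spec_convert_to_base_three (n : Int) (out : List Int) : Prop := out = convert_to_base_three_alt n
instance (n : Int) (out : List Int) : Decidable (Spec_convert_to_base_three n out) := by unfold Spec_convert_to_base_three; infer_instance

-- ===== CLAIM (what is proved, stated in full; the proofs are below) =====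
def Claim_equal_convert_to_base_three : Prop := ∀ (n : Int), Dom_convert_to_base_three n → Pre_convert_to_base_three n → Spec_convert_to_base_three n (convert_to_base_three n)

-- ===== LEMMAS AND PROOFS =====
-- reference digit list (LSB first), used only by the proofs
def pvDigits (m : Int) : List Int :=
  if m ≤ 0 then []
  else m % 3 :: pvDigits (m / 3)
termination_by m.toNat
decreasing_by omega

theorem loopA_eq_append_digits (k : Nat) (n : Int) (ret : List Int) (hn : 0 ≤ n) (hk : n.toNat ≤ k) :
    convert_to_base_three_loop n ret = ret ++ pvDigits n := by
  induction k generalizing n ret with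
  | zero =>
      have : n = 0 := by omega
      subst this
      simp [convert_to_base_three_loop, pvDigits]
  | succ k ih =>
      rw [convert_to_base_three_loop, pvDigits]
      by_cases h0 : n = 0
      · simp [h0]
      · have h3 : PySem.Int.floordiv n 3 = n / 3 := PySem.Int.floordiv_eq_ediv_of_pos (by omega)
        have hm : PySem.Int.mod n 3 = n % 3 := PySem.Int.mod_eq_emod_of_pos (by omega)
        rw [if_neg h0, if_neg (by omega), dif_neg (by omega)]
        rw [ih (PySem.Int.floordiv n 3) _ (by rw [h3]; omega) (by rw [h3]; omega)]
        rw [h3, hm]; simp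

theorem loopB_eq_digits (k : Nat) (n p : Int) (hp : 1 ≤ p) (hk : (n + 1 - p).toNat ≤ k) :
    convert_to_base_three_pow n p = pvDigits (n / p) := by
  induction k generalizing p with
  | zero =>
      have hnp : ¬ p ≤ n := by omega
      rw [convert_to_base_three_pow, dif_pos hnp, pvDigits]
      have : n / p ≤ 0 := by
        calc n / p ≤ (p - 1) / p := Int.ediv_le_ediv (by omega) (by omega)
        _ = 0 := Int.ediv_eq_zero_of_lt (by omega) (by omega)
      rw [if_pos this]
  | succ k ih =>
      rw [convert_to_base_three_pow, pvDigits]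
      by_cases hnp : p ≤ n
      · rw [dif_neg (by omega), dif_neg (by omega)]
        have hm : PySem.Int.mod (PySem.Int.floordiv n p) 3 = (n / p) % 3 := by
          rw [PySem.Int.floordiv_eq_ediv_of_pos (by omega),
              PySem.Int.mod_eq_emod_of_pos (by omega)]
        have hdivpos : ¬ n / p ≤ 0 := by
          have : 1 ≤ n / p := Int.le_ediv_iff_mul_le (by omega) |>.mpr (by omega)
          omega
        rw [if_neg hdivpos, hm, ih (p * 3) (by omega) (by omega)]
        have : n / p / 3 = n / (p * 3) := Int.ediv_ediv_of_nonneg (by omega)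
        rw [this]
      · rw [dif_pos hnp]
        have : n / p ≤ 0 := by
          calc n / p ≤ (p - 1) / p := Int.ediv_le_ediv (by omega) (by omega)
          _ = 0 := Int.ediv_eq_zero_of_lt (by omega) (by omega)
        rw [if_pos this]

-- ===== VERDICT (by name: the statement is the Claim_ definition above) =====
theorem convert_to_base_three_spec : Claim_equal_convert_to_base_three := by
  intro n _ hpre
  unfold Spec_convert_to_base_three convert_to_base_three convert_to_base_three_alt
  by_cases h0 : n = 0
  · simp [h0]
  · rw [if_neg h0, if_neg h0,
        loopA_eq_append_digits n.toNat n [] hpre le_rfl,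
        loopB_eq_digits (n + 1 - 1).toNat n 1 le_rfl le_rfl]
    simp
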